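-- pv_equiv track=rewrite | github.com/lucaslmrs/blackjack | recursos.py | contar_pontos_ases
-- ===== SOURCE A (Python) =====
-- def contar_pontos_ases(num_ases, pontos):
--     pontos_em_aberto = 21 - pontos
--     ases_pontos = 0
--     for n in range(num_ases):
--         if n == num_ases - 1:
--             if pontos_em_aberto >= 11:
--                 ases_pontos += 11
--                 pontos_em_aberto - 11
--                 continue
--         ases_pontos += 1
--         pontos_em_aberto -= 1
--     return ases_pontos
-- ===== SOURCE B (Python) =====
-- def contar_pontos_ases(num_ases, pontos):
--     # Closed form: every ace but the last is worth 1; the last is worth 11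
--     # if it still fits in the remaining open points, else 1.
--     if num_ases <= 0:
--         return 0
--     resto = 21 - pontos - (num_ases - 1)
--     return (num_ases - 1) + (11 if resto >= 11 else 1)
-- ===== Notes on version B (the rewrite author's own statement) =====
-- stated objective: simpler
-- what changed: Replaced the per-ace loop with a closed-form arithmetic expression: each ace but the last contributes 1, the last contributes 11 or 1 depending on the remaining open points.
import Mathlib
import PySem

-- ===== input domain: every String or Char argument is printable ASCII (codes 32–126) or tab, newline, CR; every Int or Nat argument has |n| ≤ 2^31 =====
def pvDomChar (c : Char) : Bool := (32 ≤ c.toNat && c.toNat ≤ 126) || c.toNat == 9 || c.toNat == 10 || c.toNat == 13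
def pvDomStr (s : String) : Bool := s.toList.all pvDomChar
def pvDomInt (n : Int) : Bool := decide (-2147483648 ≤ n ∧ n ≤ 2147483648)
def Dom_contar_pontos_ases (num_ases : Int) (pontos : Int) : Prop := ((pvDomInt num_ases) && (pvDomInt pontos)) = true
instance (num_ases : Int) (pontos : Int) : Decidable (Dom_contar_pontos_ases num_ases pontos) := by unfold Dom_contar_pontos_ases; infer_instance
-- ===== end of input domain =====

-- B replaces A's per-ace loop by a closed-form arithmetic expression (objective: simpler).

-- ===== PORT A =====
-- loop state: (ases_pontos, pontos_em_aberto); the 'continue' branch adds 11 and leaves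
-- pontos_em_aberto unchanged ('pontos_em_aberto - 11' in A is a discarded expression)
def contar_pontos_ases (num_ases : Int) (pontos : Int) : Int :=
  (((PySem.List.pyRange 0 num_ases 1).foldl
      (fun (st : Int × Int) n =>
        if n = num_ases - 1 ∧ st.2 ≥ 11 then (st.1 + 11, st.2)
        else (st.1 + 1, st.2 - 1))
      (0, 21 - pontos))).1

-- ===== PORT B =====
def contar_pontos_ases_alt (num_ases : Int) (pontos : Int) : Int :=
  if num_ases ≤ 0 then 0
  else
    let resto := 21 - pontos - (num_ases - 1)
    (num_ases - 1) + (if resto ≥ 11 then 11 else 1)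

-- ===== PRECONDITION & SPEC =====
def Spec_contar_pontos_ases (num_ases : Int) (pontos : Int) (out : Int) : Prop := out = contar_pontos_ases_alt num_ases pontos
instance (num_ases : Int) (pontos : Int) (out : Int) : Decidable (Spec_contar_pontos_ases num_ases pontos out) := by unfold Spec_contar_pontos_ases; infer_instance

-- ===== CLAIM (what is proved, stated in full; the proofs are below) =====
def Claim_equal_contar_pontos_ases : Prop := ∀ (num_ases : Int) (pontos : Int), Dom_contar_pontos_ases num_ases pontos → Spec_contar_pontos_ases num_ases pontos (contar_pontos_ases num_ases pontos)

-- ===== LEMMAS AND PROOFS =====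

-- On indices strictly below num_ases - 1 the loop is just (+1, -1) on the state.
theorem contar_fold_pre (N : Int) : ∀ (k : Nat) (a : Int) (st : Int × Int), a + k ≤ N - 1 →
    (PySem.List.pyRange a (a + k) 1).foldl
      (fun (st : Int × Int) n =>
        if n = N - 1 ∧ st.2 ≥ 11 then (st.1 + 11, st.2)
        else (st.1 + 1, st.2 - 1)) st
    = (st.1 + k, st.2 - k) := by
  intro k
  induction k with
  | zero =>
    intro a st _
    rw [PySem.List.pyRange_one_eq_nil (by omega)]
    simp
  | succ k ih =>
    intro a st h
    rw [PySem.List.pyRange_one_cons (by omega)]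
    simp only [List.foldl_cons]
    have hne : ¬ (a = N - 1 ∧ st.2 ≥ 11) := by
      rintro ⟨ha, _⟩; omega
    rw [if_neg hne]
    have h2 : (a + 1) + (k : Int) ≤ N - 1 := by omega
    rw [show a + ((k + 1 : Nat) : Int) = (a + 1) + (k : Int) from by push_cast; ring,
        ih (a + 1) (st.1 + 1, st.2 - 1) h2]
    simp only [Prod.mk.injEq]
    constructor <;> push_cast <;> ring

-- ===== VERDICT (by name: the statement is the Claim_ definition above) =====
theorem contar_pontos_ases_spec : Claim_equal_contar_pontos_ases := by
  intro N pontos _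
  unfold Spec_contar_pontos_ases contar_pontos_ases contar_pontos_ases_alt
  by_cases hN : N ≤ 0
  · rw [PySem.List.pyRange_one_eq_nil (by omega), if_pos hN]
    simp
  · rw [if_neg hN]
    have h1 : (0 : Int) ≤ N - 1 := by omega
    rw [PySem.List.pyRange_one_append 0 (N - 1) N (by omega) (by omega)]
    rw [List.foldl_append]
    have hk : ((N - 1).toNat : Int) = N - 1 := by omega
    have := contar_fold_pre N (N - 1).toNat 0 (0, 21 - pontos) (by omega)
    rw [show (0 : Int) + ((N - 1).toNat : Int) = N - 1 by omega] at this
    rw [this]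
    rw [PySem.List.pyRange_one_cons (show N - 1 < N by omega),
        show N - 1 + 1 = N from by ring,
        PySem.List.pyRange_one_eq_nil (le_refl N)]
    simp only [List.foldl_cons, List.foldl_nil, hk]
    split_ifs with ha hb hb <;> simp_all
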